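-- pv_equiv track=rewrite | github.com/ClayGifford1/matrix-operations | matrix_multiplication/matrix_operations.py | combine_matrix
-- ===== SOURCE A (Python) =====
-- def combine_matrix(A, B, C, D):
--
--     n = len(A) * 2 # output matrix for matrices n x n size will be 2n x 2n
--     # create ampty output matrix
--     Z = [[0 for y in range(n)] for x in range (n)]
--
--     # Fit the four matrices into the larger output matrix
--
--     half = n // 2
--
--     for i in range(half):
--         for j in range(half):
--             Z[i][j] = A[i][j]
--
--     for i in range(half):
--         for j in range(half, n):
--             Z[i][j] = B[i][j-half]
--
--     for i in range(half, n):
--         for j in range(half):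
--             Z[i][j] = C[i-half][j]
--
--     for i in range(half, n):
--         for j in range(half, n):
--             Z[i][j] = D[i-half][j-half]
--
--     return Z
-- ===== SOURCE B (Python) =====
-- def combine_matrix(A, B, C, D):
--     # Build the 2n x 2n block matrix directly by row concatenation: row i of the
--     # output is the first n columns of A[i] and B[i] (top half), resp. C[i] and
--     # D[i] (bottom half); no zero pre-allocation, no per-cell index writes.
--     half = len(A)
--     return ([A[i][:half] + B[i][:half] for i in range(half)] +
--             [C[i][:half] + D[i][:half] for i in range(half)])
-- ===== Notes on version B (the rewrite author's own statement) =====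
-- stated objective: faster
-- what changed: Replaces the pre-allocated 2n x 2n zero matrix and four nested per-cell copy loops with direct row concatenation: row i of the output is A[i][:n]+B[i][:n] (top half) or C[i][:n]+D[i][:n] (bottom half).
import Mathlib
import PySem

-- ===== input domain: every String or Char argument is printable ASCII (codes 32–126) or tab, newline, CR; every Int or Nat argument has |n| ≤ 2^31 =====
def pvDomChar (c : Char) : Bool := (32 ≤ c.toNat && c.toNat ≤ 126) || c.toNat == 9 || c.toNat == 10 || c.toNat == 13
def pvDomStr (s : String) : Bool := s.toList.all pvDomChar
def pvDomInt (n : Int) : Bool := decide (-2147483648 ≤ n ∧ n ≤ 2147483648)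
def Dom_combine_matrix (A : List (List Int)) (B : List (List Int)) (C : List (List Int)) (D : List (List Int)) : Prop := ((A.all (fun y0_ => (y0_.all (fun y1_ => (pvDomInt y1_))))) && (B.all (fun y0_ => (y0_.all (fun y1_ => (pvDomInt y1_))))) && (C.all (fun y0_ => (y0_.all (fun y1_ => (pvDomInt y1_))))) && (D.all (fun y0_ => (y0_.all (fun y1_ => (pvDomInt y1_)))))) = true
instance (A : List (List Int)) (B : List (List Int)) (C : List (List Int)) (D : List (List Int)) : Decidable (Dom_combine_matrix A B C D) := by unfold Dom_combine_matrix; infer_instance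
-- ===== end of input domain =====

-- B replaces A's pre-allocated 2n×2n zero matrix and four per-cell copy loops by direct
-- row concatenation (output row i is A[i][:n]+B[i][:n], resp. C[i][:n]+D[i][:n]).

-- ===== PORT A =====
-- Literal transliteration of A: allocate the zero matrix, then four nested
-- index loops writing the quadrants into it (Z[i][j] = v is List.modify/set;
-- A[i][j] reads are getD-based, exact on in-range indices, which Pre_ ensures).
def combine_matrix (A : List (List Int)) (B : List (List Int)) (C : List (List Int)) (D : List (List Int)) : List (List Int) :=
  let n := A.length * 2
  let Z := (List.range n).map (fun _ => (List.range n).map (fun _ => (0 : Int)))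
  let half := n / 2
  let Z := (List.range half).foldl (fun Z i =>
    (List.range half).foldl (fun Z j =>
      Z.modify i (fun row => row.set j ((A.getD i []).getD j 0))) Z) Z
  let Z := (List.range half).foldl (fun Z i =>
    (List.range' half (n - half)).foldl (fun Z j =>
      Z.modify i (fun row => row.set j ((B.getD i []).getD (j - half) 0))) Z) Z
  let Z := (List.range' half (n - half)).foldl (fun Z i =>
    (List.range half).foldl (fun Z j =>
      Z.modify i (fun row => row.set j ((C.getD (i - half) []).getD j 0))) Z) Z
  let Z := (List.range' half (n - half)).foldl (fun Z i =>
    (List.range' half (n - half)).foldl (fun Z j =>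
      Z.modify i (fun row => row.set j ((D.getD (i - half) []).getD (j - half) 0))) Z) Z
  Z

-- ===== PORT B =====
-- Literal transliteration of B:
-- [A[i][:half] + B[i][:half] for i in range(half)] + [C[i][:half] + D[i][:half] for i in range(half)]
-- (row reads via getD, exact on in-range indices, which Pre_ ensures; [:half] with half ≥ 0 is List.take)
def combine_matrix_alt (A : List (List Int)) (B : List (List Int)) (C : List (List Int)) (D : List (List Int)) : List (List Int) :=
  let half := A.length
  (List.range half).map (fun i => (A.getD i []).take half ++ (B.getD i []).take half) ++
  (List.range half).map (fun i => (C.getD i []).take half ++ (D.getD i []).take half)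

-- ===== PRECONDITION & SPEC =====
-- Pre_ is exactly the set of inputs on which A returns (no IndexError): the first
-- len(A) rows of B, C and D exist, and every row of A and every used row of B, C, D
-- has at least len(A) entries.
def Pre_combine_matrix (A : List (List Int)) (B : List (List Int)) (C : List (List Int)) (D : List (List Int)) : Prop :=
  A.length ≤ B.length ∧ A.length ≤ C.length ∧ A.length ≤ D.length ∧
  ∀ m ∈ ((A ++ B.take A.length ++ C.take A.length ++ D.take A.length).map List.length).dedup,
    A.length ≤ m
instance (A : List (List Int)) (B : List (List Int)) (C : List (List Int)) (D : List (List Int)) : Decidable (Pre_combine_matrix A B C D) := by unfold Pre_combine_matrix; infer_instance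

def pvWitness_combine_matrix : List (List Int) × List (List Int) × List (List Int) × List (List Int) :=
  ([[1, 2, 3], [4, 5, 6], [7, 8, 9]], [[1, 0, 0], [0, 1, 0], [0, 0, 1]], [[2, 0, 0], [0, 2, 0], [0, 0, 2]], [[9, 8, 7], [6, 5, 4], [3, 2, 1]])

def Spec_combine_matrix (A : List (List Int)) (B : List (List Int)) (C : List (List Int)) (D : List (List Int)) (out : List (List Int)) : Prop := out = combine_matrix_alt A B C D
instance (A : List (List Int)) (B : List (List Int)) (C : List (List Int)) (D : List (List Int)) (out : List (List Int)) : Decidable (Spec_combine_matrix A B C D out) := by unfold Spec_combine_matrix; infer_instance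

-- ===== CLAIM (what is proved, stated in full; the proofs are below) =====
def Claim_equal_combine_matrix : Prop := ∀ (A : List (List Int)) (B : List (List Int)) (C : List (List Int)) (D : List (List Int)), Dom_combine_matrix A B C D → Pre_combine_matrix A B C D → Spec_combine_matrix A B C D (combine_matrix A B C D)

-- ===== LEMMAS AND PROOFS =====

lemma pv_modify_modify_same (Z : List (List Int)) (i : Nat) (f g : List Int → List Int) :
    (Z.modify i f).modify i g = Z.modify i (fun x => g (f x)) := by
  apply List.ext_getElem?
  intro j
  simp only [List.getElem?_modify]
  cases Z[j]? <;> simp <;> split <;> simp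

lemma pv_fuse (i : Nat) (h : Nat → List Int → List Int) :
    ∀ (js : List Nat) (Z : List (List Int)),
      js.foldl (fun Z j => Z.modify i (h j)) Z
        = Z.modify i (fun row => js.foldl (fun r j => h j r) row)
  | [], Z => by
    apply List.ext_getElem?
    intro j
    simp only [List.foldl_nil, List.getElem?_modify]
    cases Z[j]? <;> simp <;> split <;> simp
  | a :: js, Z => by
    simp only [List.foldl_cons]
    rw [pv_fuse i h js, pv_modify_modify_same]

lemma pv_getElem?_foldl_modify :
    ∀ (is : List Nat) (g : Nat → List Int → List Int) (Z : List (List Int)) (k : Nat),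
      is.Nodup →
      (is.foldl (fun Z i => Z.modify i (g i)) Z)[k]?
        = if k ∈ is then Z[k]?.map (g k) else Z[k]?
  | [], g, Z, k, _ => by simp
  | a :: is, g, Z, k, h => by
    simp only [List.foldl_cons]
    rw [pv_getElem?_foldl_modify is g _ k h.of_cons]
    rcases List.nodup_cons.mp h with ⟨ha, _⟩
    by_cases hk : k = a
    · subst hk
      simp [ha, List.getElem?_modify]
    · have : a ≠ k := fun e => hk e.symm
      by_cases hmem : k ∈ is <;>
        simp [hmem, hk, this, List.getElem?_modify]

lemma pv_length_foldl_set (v : Nat → Int) :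
    ∀ (js : List Nat) (r : List Int),
      (js.foldl (fun r j => r.set j (v j)) r).length = r.length
  | [], r => rfl
  | a :: js, r => by
    simp only [List.foldl_cons]
    rw [pv_length_foldl_set v js]
    simp

lemma pv_getElem?_foldl_set (v : Nat → Int) :
    ∀ (js : List Nat) (r : List Int) (j : Nat),
      js.Nodup →
      (js.foldl (fun r j => r.set j (v j)) r)[j]?
        = if j ∈ js then (if j < r.length then some (v j) else none) else r[j]?
  | [], r, j, _ => by simp
  | a :: js, r, j, h => by
    simp only [List.foldl_cons]
    rw [pv_getElem?_foldl_set v js _ j h.of_cons]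
    rcases List.nodup_cons.mp h with ⟨ha, _⟩
    by_cases hj : j = a
    · subst hj
      simp [ha, List.getElem?_set]
    · by_cases hmem : j ∈ js
      · simp [hmem, hj]
      · simp [hmem, hj, List.getElem?_set]
        intro e
        exact absurd e.symm hj

-- the content of one output row: the two set-loops over a length-2·half zero row
-- produce exactly the concatenation X.take half ++ Y.take half
lemma pv_row_block (half : Nat) (X Y : List Int) (hX : half ≤ X.length) (hY : half ≤ Y.length) :
    (List.range' half half).foldl (fun r j => r.set j (Y.getD (j - half) 0))
      ((List.range half).foldl (fun r j => r.set j (X.getD j 0))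
        ((List.range (half * 2)).map (fun _ => (0 : Int)))) = X.take half ++ Y.take half := by
  apply List.ext_getElem?
  intro j
  have hlen : ((List.range half).foldl (fun r j => r.set j (X.getD j 0))
      ((List.range (half * 2)).map (fun _ => (0 : Int)))).length = half * 2 := by
    rw [pv_length_foldl_set]; simp
  rw [pv_getElem?_foldl_set _ _ _ _ (List.nodup_range' 1),
      pv_getElem?_foldl_set _ _ _ _ List.nodup_range]
  rw [hlen]
  simp only [List.mem_range'_1, List.mem_range]
  have hXt : (X.take half).length = half := by simp; omega
  have hYt : (Y.take half).length = half := by simp; omega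
  by_cases h1 : j < half
  · have hmem : ¬ (half ≤ j ∧ j < half + half) := by omega
    have hj' : j < X.length := by omega
    have hR : (X.take half ++ Y.take half)[j]? = some X[j] := by
      rw [List.getElem?_append_left (by omega : j < (X.take half).length)]
      simp [List.getElem?_take, h1, List.getElem?_eq_getElem hj']
    have hj2 : j < half * 2 := by omega
    simp [hmem, h1, hj2, hR, List.getD_eq_getElem?_getD, List.getElem?_eq_getElem hj']
  · by_cases h2 : j < half * 2
    · have hmem : half ≤ j ∧ j < half + half := by omega
      have hj' : j - half < Y.length := by omega
      have hjh : j - half < half := by omega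
      have hR : (X.take half ++ Y.take half)[j]? = some Y[j - half] := by
        rw [List.getElem?_append_right (by omega : (X.take half).length ≤ j), hXt]
        simp [List.getElem?_take, hjh, List.getElem?_eq_getElem hj']
      simp [hmem, h2, hR, List.getD_eq_getElem?_getD, List.getElem?_eq_getElem hj']
    · have hmem : ¬ (half ≤ j ∧ j < half + half) := by omega
      have hR : (X.take half ++ Y.take half)[j]? = none := by
        apply List.getElem?_eq_none
        simp [hXt, hYt]; omega
      simp [hmem, h1, hR, List.getElem?_map,
        List.getElem?_eq_none (by simp; omega : (List.range (half * 2)).length ≤ j)]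
      omega

lemma pv_take_row_len {B : List (List Int)} {n i : Nat}
    (h : ∀ r ∈ B.take n, n ≤ r.length) (hi : i < n) (hib : i < B.length) :
    n ≤ B[i].length := by
  have hlt : i < (B.take n).length := by simp; omega
  have hm : B[i] ∈ B.take n := by
    have := List.getElem_mem hlt
    rwa [List.getElem_take] at this
  exact h _ hm

lemma pv_main (A : List (List Int)) (B : List (List Int)) (C : List (List Int)) (D : List (List Int))
    (hpre : Pre_combine_matrix A B C D) :
    combine_matrix A B C D = combine_matrix_alt A B C D := by
  obtain ⟨hB, hC, hD, hrows⟩ := hpre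
  have key : ∀ r ∈ A ++ B.take A.length ++ C.take A.length ++ D.take A.length,
      A.length ≤ r.length :=
    fun r hr => hrows _ (List.mem_dedup.mpr (List.mem_map_of_mem hr))
  have hrA : ∀ r ∈ A, A.length ≤ r.length := fun r hr => key r (by simp [hr])
  have hrB' : ∀ r ∈ B.take A.length, A.length ≤ r.length := fun r hr => key r (by simp [hr])
  have hrC' : ∀ r ∈ C.take A.length, A.length ≤ r.length := fun r hr => key r (by simp [hr])
  have hrD' : ∀ r ∈ D.take A.length, A.length ≤ r.length := fun r hr => key r (by simp [hr])
  have hrB : ∀ i, i < A.length → (hi : i < B.length) → A.length ≤ B[i].length :=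
    fun i h hi => pv_take_row_len hrB' h hi
  have hrC : ∀ i, i < A.length → (hi : i < C.length) → A.length ≤ C[i].length :=
    fun i h hi => pv_take_row_len hrC' h hi
  have hrD : ∀ i, i < A.length → (hi : i < D.length) → A.length ≤ D[i].length :=
    fun i h hi => pv_take_row_len hrD' h hi
  set half := A.length with hhalf
  show
    (let n := A.length * 2
     let Z := (List.range n).map (fun _ => (List.range n).map (fun _ => (0 : Int)))
     let half := n / 2
     let Z := (List.range half).foldl (fun Z i =>
       (List.range half).foldl (fun Z j =>
         Z.modify i (fun row => row.set j ((A.getD i []).getD j 0))) Z) Z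
     let Z := (List.range half).foldl (fun Z i =>
       (List.range' half (n - half)).foldl (fun Z j =>
         Z.modify i (fun row => row.set j ((B.getD i []).getD (j - half) 0))) Z) Z
     let Z := (List.range' half (n - half)).foldl (fun Z i =>
       (List.range half).foldl (fun Z j =>
         Z.modify i (fun row => row.set j ((C.getD (i - half) []).getD j 0))) Z) Z
     let Z := (List.range' half (n - half)).foldl (fun Z i =>
       (List.range' half (n - half)).foldl (fun Z j =>
         Z.modify i (fun row => row.set j ((D.getD (i - half) []).getD (j - half) 0))) Z) Z
     Z) = combine_matrix_alt A B C D
  simp only []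
  have e2 : A.length * 2 / 2 = half := by omega
  have e3 : A.length * 2 - half = half := by omega
  rw [e2, e3]
  have f1 : (fun (Z : List (List Int)) (i : Nat) =>
      (List.range half).foldl (fun Z j =>
        Z.modify i (fun row => row.set j ((A.getD i []).getD j 0))) Z)
      = (fun Z i => Z.modify i (fun row =>
          (List.range half).foldl (fun r j => r.set j ((A.getD i []).getD j 0)) row)) := by
    funext Z i; exact pv_fuse i _ _ _
  have f2 : (fun (Z : List (List Int)) (i : Nat) =>
      (List.range' half half).foldl (fun Z j =>
        Z.modify i (fun row => row.set j ((B.getD i []).getD (j - half) 0))) Z)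
      = (fun Z i => Z.modify i (fun row =>
          (List.range' half half).foldl (fun r j => r.set j ((B.getD i []).getD (j - half) 0)) row)) := by
    funext Z i; exact pv_fuse i _ _ _
  have f3 : (fun (Z : List (List Int)) (i : Nat) =>
      (List.range half).foldl (fun Z j =>
        Z.modify i (fun row => row.set j ((C.getD (i - half) []).getD j 0))) Z)
      = (fun Z i => Z.modify i (fun row =>
          (List.range half).foldl (fun r j => r.set j ((C.getD (i - half) []).getD j 0)) row)) := by
    funext Z i; exact pv_fuse i _ _ _
  have f4 : (fun (Z : List (List Int)) (i : Nat) =>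
      (List.range' half half).foldl (fun Z j =>
        Z.modify i (fun row => row.set j ((D.getD (i - half) []).getD (j - half) 0))) Z)
      = (fun Z i => Z.modify i (fun row =>
          (List.range' half half).foldl (fun r j => r.set j ((D.getD (i - half) []).getD (j - half) 0)) row)) := by
    funext Z i; exact pv_fuse i _ _ _
  rw [f1, f2, f3, f4]
  apply List.ext_getElem?
  intro k
  rw [pv_getElem?_foldl_modify _ _ _ _ (List.nodup_range' 1),
      pv_getElem?_foldl_modify _ _ _ _ (List.nodup_range' 1),
      pv_getElem?_foldl_modify _ _ _ _ List.nodup_range,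
      pv_getElem?_foldl_modify _ _ _ _ List.nodup_range]
  simp only [List.mem_range'_1, List.mem_range]
  have lzipAB : (((List.range half).map (fun i => (A.getD i []).take half ++ (B.getD i []).take half))).length = half := by
    simp
  by_cases h1 : k < half
  · -- upper rows
    have hmem : ¬ (half ≤ k ∧ k < half + half) := by omega
    have hkA : k < A.length := by omega
    have hkB : k < B.length := by omega
    have eA : A.getD k [] = A[k] := by
      simp [List.getD_eq_getElem?_getD, List.getElem?_eq_getElem hkA]
    have eB : B.getD k [] = B[k] := by
      simp [List.getD_eq_getElem?_getD, List.getElem?_eq_getElem hkB]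
    have hrow : (List.range' half half).foldl
        (fun r j => r.set j ((B.getD k []).getD (j - half) 0))
        ((List.range half).foldl (fun r j => r.set j ((A.getD k []).getD j 0))
          ((List.range (A.length * 2)).map (fun _ => (0 : Int)))) = A[k].take half ++ B[k].take half := by
      rw [eA, eB, (show A.length * 2 = half * 2 by omega)]
      exact pv_row_block half A[k] B[k] (hrA _ (List.getElem_mem hkA)) (hrB k h1 hkB)
    have hR : (combine_matrix_alt A B C D)[k]? = some (A[k].take half ++ B[k].take half) := by
      rw [combine_matrix_alt]
      rw [List.getElem?_append_left (by rw [lzipAB]; omega),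
        List.getElem?_map, List.getElem?_range (by omega : k < half)]
      simp only [Option.map_some, ← hhalf, eA, eB]
    simp only [h1, hmem, List.getElem?_map, List.getElem?_range (show k < A.length * 2 by omega),
      Option.map_some, not_false_eq_true, and_false, false_and, iff_true, if_true, if_false,
      ite_true, ite_false, eq_self_iff_true, reduceIte]
    rw [hrow, hR]
  · by_cases h2 : k < half * 2
    · -- lower rows
      have hmem : half ≤ k ∧ k < half + half := by omega
      have hkC : k - half < C.length := by omega
      have hkD : k - half < D.length := by omega
      have eC : C.getD (k - half) [] = C[k - half] := by
        simp [List.getD_eq_getElem?_getD, List.getElem?_eq_getElem hkC]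
      have eD : D.getD (k - half) [] = D[k - half] := by
        simp [List.getD_eq_getElem?_getD, List.getElem?_eq_getElem hkD]
      have hrow : (List.range' half half).foldl
          (fun r j => r.set j ((D.getD (k - half) []).getD (j - half) 0))
          ((List.range half).foldl (fun r j => r.set j ((C.getD (k - half) []).getD j 0))
            ((List.range (A.length * 2)).map (fun _ => (0 : Int)))) = C[k - half].take half ++ D[k - half].take half := by
        rw [eC, eD, (show A.length * 2 = half * 2 by omega)]
        exact pv_row_block half C[k - half] D[k - half]
          (hrC (k - half) (by omega) hkC) (hrD (k - half) (by omega) hkD)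
      have hR : (combine_matrix_alt A B C D)[k]? = some (C[k - half].take half ++ D[k - half].take half) := by
        rw [combine_matrix_alt]
        rw [List.getElem?_append_right (by rw [lzipAB]; omega), lzipAB,
          List.getElem?_map, List.getElem?_range (by omega : k - half < half)]
        simp only [Option.map_some, ← hhalf, eC, eD]
      simp only [h1, hmem, List.getElem?_map, List.getElem?_range (show k < A.length * 2 by omega),
        Option.map_some, not_false_eq_true, and_self, iff_true, if_true, if_false,
        ite_true, ite_false, eq_self_iff_true, reduceIte]
      rw [hrow, hR]
    · -- out of range: both sides none
      have hmem : ¬ (half ≤ k ∧ k < half + half) := by omega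
      have hz : (List.range (A.length * 2))[k]? = none := by
        apply List.getElem?_eq_none; simp; omega
      have hR : (combine_matrix_alt A B C D)[k]? = none := by
        apply List.getElem?_eq_none
        rw [combine_matrix_alt]
        simp; omega
      simp only [hmem, h1, hz, List.getElem?_map, Option.map_none, if_true, if_false,
        not_false_eq_true, iff_true, ite_true, ite_false, reduceIte]
      rw [hR]

-- ===== VERDICT (by name: the statement is the Claim_ definition above) =====
theorem combine_matrix_spec : Claim_equal_combine_matrix := by
  intro A B C D _ hpre
  exact pv_main A B C D hpre
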